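-- pv_equiv track=rewrite | github.com/arifkhan1990/HackerEarth-solution | Algorithms/Searching/Linear Search/Python/Find Mex.py | find_mex
-- ===== SOURCE A (Python) =====
-- def find_mex(arr):
--     mex_values = []
--     seen_set = set()
--     max_seen = -1
--
--     for num in arr:
--         seen_set.add(num)
--
--         while max_seen + 1 in seen_set:
--             max_seen += 1
--
--         mex_values.append(max_seen + 1)
--
--     return mex_values
-- ===== SOURCE B (Python) =====
-- def find_mex(arr):
--     # Recomputes each prefix MEX from scratch by sorting the distinct values
--     # of the prefix and scanning the sorted list for the first gap.
--     def mex_of(prefix):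
--         m = 0
--         for v in sorted(set(prefix)):
--             if v == m:
--                 m += 1
--             elif v > m:
--                 break
--         return m
--     return [mex_of(arr[:i + 1]) for i in range(len(arr))]
-- ===== Notes on version B (the rewrite author's own statement) =====
-- stated objective: alternative
-- what changed: B drops A's incremental seen-set/cursor state entirely and recomputes each prefix MEX from scratch by sorting the distinct prefix values and scanning the sorted list for the first gap.
import Mathlib
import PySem

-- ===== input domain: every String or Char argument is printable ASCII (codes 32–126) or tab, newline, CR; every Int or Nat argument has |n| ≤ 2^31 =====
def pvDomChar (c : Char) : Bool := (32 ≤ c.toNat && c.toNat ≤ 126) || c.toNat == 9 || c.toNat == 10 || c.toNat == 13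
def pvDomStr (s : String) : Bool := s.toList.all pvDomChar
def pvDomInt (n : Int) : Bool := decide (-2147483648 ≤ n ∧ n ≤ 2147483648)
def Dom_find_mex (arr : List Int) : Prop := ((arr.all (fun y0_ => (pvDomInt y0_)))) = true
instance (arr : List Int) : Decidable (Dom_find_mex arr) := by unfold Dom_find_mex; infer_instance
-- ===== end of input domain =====

-- B replaces A's incremental seen-set/cursor with a per-prefix recomputation that
-- sorts the distinct prefix values and scans for the first gap (alternative algorithm).

-- ===== PORT A =====
-- A's 'while max_seen + 1 in seen_set: max_seen += 1' as fuel recursion; fuel |seen|+1 always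
-- suffices (each successful probe hits a distinct element of seen), so this is the exact loop.
def whileA (seen : PySem.Set Int) : Nat → Int → Int
  | 0, m => m
  | fuel+1, m => if (m + 1) ∈ seen then whileA seen fuel (m + 1) else m

def find_mex (arr : List Int) : List Int :=
  (arr.foldl
    (fun (st : PySem.Set Int × Int × List Int) num =>
      let seen := PySem.Set.add st.1 num
      let m := whileA seen (seen.length + 1) st.2.1
      (seen, m, st.2.2 ++ [m + 1]))
    (PySem.Set.empty, -1, [])).2.2

-- ===== PORT B =====
-- B's 'for v in sorted(set(prefix)): if v == m: m += 1 elif v > m: break' as a scan with break.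
def mexScan : List Int → Int → Int
  | [], m => m
  | v :: vs, m => if v = m then mexScan vs (m + 1) else if m < v then m else mexScan vs m

def mex_of (p : List Int) : Int :=
  mexScan (PySem.List.sorted (PySem.Set.ofList p) (fun x => x) false) 0

def find_mex_alt (arr : List Int) : List Int :=
  (List.range arr.length).map (fun i => mex_of (arr.take (i + 1)))

-- ===== PRECONDITION & SPEC =====
def Spec_find_mex (arr : List Int) (out : List Int) : Prop := out = find_mex_alt arr
instance (arr : List Int) (out : List Int) : Decidable (Spec_find_mex arr out) := by unfold Spec_find_mex; infer_instance

-- ===== CLAIM =====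
def Claim_equal_find_mex : Prop := ∀ (arr : List Int), Dom_find_mex arr → Spec_find_mex arr (find_mex arr)

-- ===== LEMMAS AND PROOFS =====

-- the canonical characterisation both programs compute: the least nonnegative int not in p
def IsMex (p : List Int) (r : Int) : Prop :=
  0 ≤ r ∧ r ∉ p ∧ ∀ k : Int, 0 ≤ k → k < r → k ∈ p

theorem IsMex_unique {p : List Int} {r1 r2 : Int} (h1 : IsMex p r1) (h2 : IsMex p r2) : r1 = r2 := by
  obtain ⟨h10, h1n, h1a⟩ := h1
  obtain ⟨h20, h2n, h2a⟩ := h2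
  by_contra hne
  rcases lt_or_gt_of_ne hne with h | h
  · exact h1n (h2a r1 h10 h)
  · exact h2n (h1a r2 h20 h)

-- ---------- B side ----------
theorem mexScan_char (l : List Int) (hl : l.Pairwise (· < ·)) :
    ∀ m : Int, m ≤ mexScan l m ∧ mexScan l m ∉ l ∧
      ∀ k : Int, m ≤ k → k < mexScan l m → k ∈ l := by
  induction l with
  | nil =>
    intro m
    simp only [mexScan]
    exact ⟨le_refl _, List.not_mem_nil, fun k hk1 hk2 => by omega⟩
  | cons v vs ih =>
    have hv : ∀ x ∈ vs, v < x := fun x hx => List.rel_of_pairwise_cons hl hx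
    have hvs : vs.Pairwise (· < ·) := hl.of_cons
    intro m
    simp only [mexScan]
    split_ifs with heq hlt
    · -- v = m, recurse with m+1
      obtain ⟨hle, hnot, hall⟩ := ih hvs (m + 1)
      refine ⟨by omega, ?_, ?_⟩
      · intro hmem
        rcases List.mem_cons.mp hmem with h | h
        · omega
        · exact hnot h
      · intro k hk1 hk2
        rcases eq_or_lt_of_le hk1 with h | h
        · exact List.mem_cons.mpr (Or.inl (by omega))
        · exact List.mem_cons.mpr (Or.inr (hall k (by omega) hk2))
    · -- m < v : return m
      refine ⟨le_refl _, ?_, fun k hk1 hk2 => by omega⟩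
      intro hmem
      rcases List.mem_cons.mp hmem with h | h
      · omega
      · have := hv _ h; omega
    · -- v < m : skip v
      obtain ⟨hle, hnot, hall⟩ := ih hvs m
      refine ⟨hle, ?_, ?_⟩
      · intro hmem
        rcases List.mem_cons.mp hmem with h | h
        · omega
        · exact hnot h
      · intro k hk1 hk2
        exact List.mem_cons.mpr (Or.inr (hall k hk1 hk2))

theorem mex_of_IsMex (p : List Int) : IsMex p (mex_of p) := by
  have hpw := PySem.List.sorted_ofList_pairwise_lt (xs := p)
  obtain ⟨hle, hnot, hall⟩ := mexScan_char _ hpw 0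
  have hmem : ∀ x : Int,
      x ∈ PySem.List.sorted (PySem.Set.ofList p) (fun x => x) false ↔ x ∈ p := by
    intro x
    rw [PySem.List.mem_sorted, PySem.Set.mem_ofList]
  exact ⟨hle, fun h => hnot ((hmem _).mpr h), fun k hk1 hk2 => (hmem _).mp (hall k hk1 hk2)⟩

-- ---------- A side ----------
def stepA (st : PySem.Set Int × Int × List Int) (num : Int) : PySem.Set Int × Int × List Int :=
  let seen := PySem.Set.add st.1 num
  let m := whileA seen (seen.length + 1) st.2.1
  (seen, m, st.2.2 ++ [m + 1])

theorem find_mex_eq_fold (arr : List Int) :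
    find_mex arr = (arr.foldl stepA (PySem.Set.empty, -1, [])).2.2 := rfl

-- A's invariant: all of 0..m are in seen and m+1 is not
def InvA (seen : PySem.Set Int) (m : Int) : Prop :=
  -1 ≤ m ∧ (∀ k : Int, 0 ≤ k → k ≤ m → k ∈ seen) ∧ (m + 1) ∉ seen

theorem exists_nat_ge_notMem (l : List Int) : ∃ n : ℕ, ∀ k : ℕ, n ≤ k → (k : Int) ∉ l := by
  induction l with
  | nil => exact ⟨0, fun k _ => List.not_mem_nil⟩
  | cons x xs ih =>
    obtain ⟨n, hn⟩ := ih
    refine ⟨max n (x.toNat + 1), fun k hk => ?_⟩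
    intro hmem
    rcases List.mem_cons.mp hmem with h | h
    · have hx : x ≤ (x.toNat : Int) := Int.self_le_toNat x
      have : (x.toNat + 1 : ℕ) ≤ k := le_trans (le_max_right _ _) hk
      omega
    · exact hn k (le_trans (le_max_left _ _) hk) h

theorem r_le_length (seen : PySem.Set Int) (r : ℕ)
    (hlt : ∀ k : ℕ, k < r → (k : Int) ∈ seen) : r ≤ seen.length := by
  have hsub : ((List.range r).map (fun k : ℕ => (k : Int))) ⊆ seen := by
    intro x hx
    obtain ⟨k, hk, rfl⟩ := List.mem_map.mp hx
    exact hlt k (List.mem_range.mp hk)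
  have hnd' : ((List.range r).map (fun k : ℕ => (k : Int))).Nodup :=
    (List.nodup_range).map (fun a b h => by exact_mod_cast h)
  have := (List.subperm_of_subset hnd' hsub).length_le
  simpa using this

theorem whileA_spec (seen : PySem.Set Int) (r : Int)
    (hr : r ∉ seen) (hlt : ∀ k : Int, 0 ≤ k → k < r → k ∈ seen) :
    ∀ (fuel : Nat) (m : Int), -1 ≤ m → m ≤ r - 1 → r - 1 - m ≤ (fuel : Int) →
      whileA seen fuel m = r - 1 := by
  intro fuel
  induction fuel with
  | zero =>
    intro m _ hm hfu
    have : m = r - 1 := by simpa using (by omega : m = r - 1)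
    simpa [whileA] using this
  | succ f ih =>
    intro m hm0 hm hfu
    rcases eq_or_lt_of_le hm with heq | hlt'
    · subst heq
      simp only [whileA]
      rw [if_neg (by simpa using hr)]
    · have hmem : (m + 1) ∈ seen := hlt (m + 1) (by omega) (by omega)
      simp only [whileA, if_pos hmem]
      exact ih (m + 1) (by omega) (by omega) (by push_cast at hfu ⊢; omega)

-- after one step of A's fold, the appended value is the MEX of the updated seen-set,
-- and the invariant is re-established
theorem stepA_core (seen : PySem.Set Int) (m num : Int) (hinv : InvA seen m) :
    InvA (PySem.Set.add seen num)
        (whileA (PySem.Set.add seen num) ((PySem.Set.add seen num).length + 1) m)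
    ∧ IsMex (PySem.Set.add seen num)
        (whileA (PySem.Set.add seen num) ((PySem.Set.add seen num).length + 1) m + 1) := by
  obtain ⟨hm, hall, hmex⟩ := hinv
  set seen' := PySem.Set.add seen num with hseen'
  have hex : ∃ n : ℕ, (n : Int) ∉ seen' := by
    obtain ⟨n, hn⟩ := exists_nat_ge_notMem seen'
    exact ⟨n, hn n le_rfl⟩
  set rn := Nat.find hex with hrdef
  have hr : (rn : Int) ∉ seen' := Nat.find_spec hex
  have hltn : ∀ k : ℕ, k < rn → (k : Int) ∈ seen' := by
    intro k hk
    have := Nat.find_min hex hk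
    simpa using this
  have hlt : ∀ k : Int, 0 ≤ k → k < (rn : Int) → k ∈ seen' := by
    intro k hk0 hkr
    have : (k.toNat : Int) = k := Int.toNat_of_nonneg hk0
    rw [← this]
    exact hltn k.toNat (by omega)
  have hsub : ∀ x, x ∈ seen → x ∈ seen' := by
    intro x hx; rw [hseen', PySem.Set.mem_add]; exact Or.inl hx
  have hrlen : rn ≤ seen'.length := r_le_length seen' rn hltn
  have hmr : m ≤ (rn : Int) - 1 := by
    by_contra h
    exact hr (hsub _ (hall _ (by omega) (by omega)))
  have hA : whileA seen' (seen'.length + 1) m = (rn : Int) - 1 :=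
    whileA_spec seen' rn hr hlt (seen'.length + 1) m hm hmr (by push_cast; omega)
  rw [hA]
  refine ⟨⟨by omega, ?_, by simpa using hr⟩, ⟨by omega, by simpa using hr, ?_⟩⟩
  · intro k hk0 hk
    exact hlt k hk0 (by omega)
  · intro k hk0 hk
    exact hlt k hk0 (by omega)

-- membership of A's seen-set tracks the processed prefix
def Tracks (seen : PySem.Set Int) (q : List Int) : Prop := ∀ x : Int, x ∈ seen ↔ x ∈ q

theorem tracks_add (seen : PySem.Set Int) (q : List Int) (num : Int)
    (h : Tracks seen q) : Tracks (PySem.Set.add seen num) (q ++ [num]) := by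
  intro x
  rw [PySem.Set.mem_add, h x, List.mem_append, List.mem_singleton, or_comm]

theorem isMex_congr {s t : List Int} {r : Int} (h : ∀ x : Int, x ∈ s ↔ x ∈ t)
    (hm : IsMex s r) : IsMex t r := by
  obtain ⟨h0, hn, ha⟩ := hm
  exact ⟨h0, fun hx => hn ((h r).mpr hx), fun k hk0 hkr => (h k).mp (ha k hk0 hkr)⟩

-- main fold lemma: A's output is acc ++ the B-computed MEX of every extended prefix
theorem foldA_eq :
    ∀ (arr q : List Int) (seen : PySem.Set Int) (m : Int) (acc : List Int),
      Tracks seen q → InvA seen m →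
      (arr.foldl stepA (seen, m, acc)).2.2
        = acc ++ (List.range arr.length).map (fun i => mex_of (q ++ arr.take (i + 1))) := by
  intro arr
  induction arr with
  | nil => intro q seen m acc _ _; simp
  | cons num rest ih =>
    intro q seen m acc htr hinv
    obtain ⟨hinv', hmex⟩ := stepA_core seen m num hinv
    have htr' : Tracks (PySem.Set.add seen num) (q ++ [num]) := tracks_add seen q num htr
    have hval : whileA (PySem.Set.add seen num) ((PySem.Set.add seen num).length + 1) m + 1
        = mex_of (q ++ [num]) := by
      refine IsMex_unique (isMex_congr ?_ hmex) (mex_of_IsMex (q ++ [num]))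
      intro x; exact htr' x
    simp only [List.foldl_cons, stepA]
    rw [ih (q ++ [num]) _ _ _ htr' hinv']
    rw [hval, List.append_assoc]
    congr 1
    -- (range (n+1)).map f = f 0 :: (range n).map (f ∘ (·+1)), and prefix reassociation
    rw [List.length_cons, List.range_succ_eq_map]
    simp only [List.map_cons, List.map_map]
    rw [List.singleton_append]
    congr 1
    apply List.map_congr_left
    intro i _
    simp [Function.comp, List.append_assoc]

-- ===== VERDICT =====
theorem find_mex_spec : Claim_equal_find_mex := by
  intro arr _
  unfold Spec_find_mex
  rw [find_mex_eq_fold,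
    foldA_eq arr [] PySem.Set.empty (-1) [] (fun x => by simp [PySem.Set.empty])
      ⟨le_refl _, fun k hk0 hk => by omega, by simp [PySem.Set.empty]⟩]
  simp [find_mex_alt]
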